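-- pv_equiv track=rewrite | github.com/zoedolan/Vybn | quantum_delusions/fundamental-theory/spine_falsification_harness.py | count_mult_carries_baseb
-- ===== SOURCE A (Python) =====
-- def count_mult_carries_baseb(a: int, b: int, base: int = 10) -> int:
--     carries = 0
--     bb = b
--     while bb > 0:
--         db = bb % base
--         aa = a
--         carry = 0
--         while aa > 0 or carry > 0:
--             da = aa % base
--             prod = da * db + carry
--             if prod >= base:
--                 carries += 1
--                 carry = prod // base
--             else:
--                 carry = 0
--             aa //= base
--         bb //= base
--     return carries
-- ===== SOURCE B (Python) =====
-- def count_mult_carries_baseb(a: int, b: int, base: int = 10) -> int: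
--     # Carry-free formulation: in the single-digit product a*db the carry into
--     # position i equals (a % base**i) * db // base**i, so a carry is generated
--     # exactly at those positions i >= 1 with (a % base**i) * db >= base**i.
--     # Count those positions directly for each digit db of b; no running carry
--     # and no digit-by-digit propagation is needed.
--     if base < 2:
--         return 0  # no positional digit expansion exists for base < 2
--     count = 0
--     bb = b
--     while bb > 0:
--         db = bb % base
--         p = base
--         while p <= a * db:  # beyond a*db every carry is 0
--             if (a % p) * db >= p:
--                 count += 1
--             p *= base
--         bb //= base
--     return count
-- ===== Notes on version B (the rewrite author's own statement) =====
-- stated objective: alternative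
-- what changed: B replaces A's digit-by-digit carry propagation (inner loop maintaining a running carry through da*db+carry) with a carry-free closed form: the carry into position i of a*db equals (a mod base^i)*db // base^i, so B counts the positions i>=1 with (a mod base^i)*db >= base^i by iterating over powers of base, keeping no carry state at all; B also guards base < 2, where no digit expansion exists.
-- intended difference: For base < 0 with a > 0 and b > 0, A returns 1 -- a spurious 'carry' counted from the nonpositive remainders Python produces for a negative divisor -- while B returns 0, the intended value since schoolbook digit multiplication (and hence a carry count) is undefined for base < 2. — e.g. on count_mult_carries_baseb(2, 2, -2): A returns 1, B returns 0
import Mathlib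
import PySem

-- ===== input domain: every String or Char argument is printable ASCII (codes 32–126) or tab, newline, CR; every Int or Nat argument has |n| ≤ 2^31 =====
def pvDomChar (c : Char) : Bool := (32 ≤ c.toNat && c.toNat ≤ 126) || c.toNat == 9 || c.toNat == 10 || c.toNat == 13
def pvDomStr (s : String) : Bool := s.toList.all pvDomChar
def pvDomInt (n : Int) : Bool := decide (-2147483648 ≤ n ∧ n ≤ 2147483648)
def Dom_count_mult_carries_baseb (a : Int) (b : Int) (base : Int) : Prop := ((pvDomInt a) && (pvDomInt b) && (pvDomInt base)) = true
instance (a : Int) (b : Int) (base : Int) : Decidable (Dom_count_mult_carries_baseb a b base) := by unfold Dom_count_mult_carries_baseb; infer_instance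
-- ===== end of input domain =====

-- B counts carries by the carry-free closed form "(a mod base^i)*db >= base^i"
-- over powers of base, maintaining no running carry, instead of A's inner loop
-- propagating a carry digit by digit (objective: alternative; same asymptotic
-- cost); on base < 0 with a, b > 0 the values differ intentionally (see D_).

-- ===== PORT A =====
-- inner `while aa > 0 or carry > 0` loop; fuel-guarded for totality only
def pvInnerA (base db : Int) : Nat → Int → Int → Int → Int
  | 0, _, _, carries => carries
  | fuel + 1, aa, carry, carries =>
    if aa > 0 ∨ carry > 0 then
      let da := PySem.Int.mod aa base
      let prod := da * db + carry
      if prod ≥ base then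
        pvInnerA base db fuel (PySem.Int.floordiv aa base) (PySem.Int.floordiv prod base) (carries + 1)
      else
        pvInnerA base db fuel (PySem.Int.floordiv aa base) 0 carries
    else carries

-- outer `while bb > 0` loop; fuel-guarded for totality only
def pvOuterA (a base : Int) : Nat → Int → Int → Int
  | 0, _, carries => carries
  | fuel + 1, bb, carries =>
    if bb > 0 then
      pvOuterA a base fuel (PySem.Int.floordiv bb base)
        (pvInnerA base (PySem.Int.mod bb base) (a.natAbs + 2) a 0 carries)
    else carries

def count_mult_carries_baseb (a : Int) (b : Int) (base : Int) : Int :=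
  pvOuterA a base (b.natAbs + 1) b 0

-- ===== PORT B =====
-- B's inner `while p <= a * db` loop over powers p of base; fuel for totality only
def pvInnerB (a db base : Int) : Nat → Int → Int → Int
  | 0, _, count => count
  | fuel + 1, p, count =>
    if p ≤ a * db then
      pvInnerB a db base fuel (p * base)
        (if (PySem.Int.mod a p) * db ≥ p then count + 1 else count)
    else count

-- B's outer `while bb > 0` loop; fuel for totality only
def pvOuterB (a base : Int) : Nat → Int → Int → Int
  | 0, _, count => count
  | fuel + 1, bb, count =>
    if bb > 0 then
      pvOuterB a base fuel (PySem.Int.floordiv bb base)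
        (pvInnerB a (PySem.Int.mod bb base) base (a.natAbs + 2) base count)
    else count

def count_mult_carries_baseb_alt (a : Int) (b : Int) (base : Int) : Int :=
  if base < 2 then 0
  else pvOuterB a base (b.natAbs + 1) b 0

-- ===== PRECONDITION & SPEC =====
-- Pre_ excludes exactly b > 0 with base ∈ {0, 1}, where A raises ZeroDivisionError
-- (base = 0) or loops forever (base = 1).
def Pre_count_mult_carries_baseb (a : Int) (b : Int) (base : Int) : Prop :=
  2 ≤ base ∨ base < 0 ∨ b ≤ 0
instance (a : Int) (b : Int) (base : Int) : Decidable (Pre_count_mult_carries_baseb a b base) := by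
  unfold Pre_count_mult_carries_baseb; infer_instance
def pvWitness_count_mult_carries_baseb : Int × Int × Int := (6, 7, 10)

-- For base < 0 with a > 0 and b > 0, A returns 1 (a spurious carry counted from the
-- nonpositive remainders of a negative divisor) while B returns 0, the intended value
-- since a digit expansion (and hence a carry count) is undefined for base < 2.
def D_count_mult_carries_baseb (a : Int) (b : Int) (base : Int) : Prop :=
  base < 0 ∧ 0 < a ∧ 0 < b
instance (a : Int) (b : Int) (base : Int) : Decidable (D_count_mult_carries_baseb a b base) := by
  unfold D_count_mult_carries_baseb; infer_instance

def Spec_count_mult_carries_baseb (a : Int) (b : Int) (base : Int) (out : Int) : Prop :=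
  ¬ D_count_mult_carries_baseb a b base → out = count_mult_carries_baseb_alt a b base
instance (a : Int) (b : Int) (base : Int) (out : Int) : Decidable (Spec_count_mult_carries_baseb a b base out) := by
  unfold Spec_count_mult_carries_baseb; infer_instance

def pvDiffWitness_count_mult_carries_baseb : Int × Int × Int := (2, 2, -2)
def pvDiffWitnessOut_count_mult_carries_baseb : Int × Int := (1, 0)

-- ===== CLAIM (what is proved, stated in full; the proofs are below) =====
def Claim_unchanged_count_mult_carries_baseb : Prop := ∀ (a : Int) (b : Int) (base : Int), Dom_count_mult_carries_baseb a b base → Pre_count_mult_carries_baseb a b base → Spec_count_mult_carries_baseb a b base (count_mult_carries_baseb a b base)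
def Claim_changed_count_mult_carries_baseb : Prop := Dom_count_mult_carries_baseb (pvDiffWitness_count_mult_carries_baseb.1) (pvDiffWitness_count_mult_carries_baseb.2.1) (pvDiffWitness_count_mult_carries_baseb.2.2) ∧ Pre_count_mult_carries_baseb (pvDiffWitness_count_mult_carries_baseb.1) (pvDiffWitness_count_mult_carries_baseb.2.1) (pvDiffWitness_count_mult_carries_baseb.2.2) ∧ D_count_mult_carries_baseb (pvDiffWitness_count_mult_carries_baseb.1) (pvDiffWitness_count_mult_carries_baseb.2.1) (pvDiffWitness_count_mult_carries_baseb.2.2) ∧ count_mult_carries_baseb (pvDiffWitness_count_mult_carries_baseb.1) (pvDiffWitness_count_mult_carries_baseb.2.1) (pvDiffWitness_count_mult_carries_baseb.2.2) = pvDiffWitnessOut_count_mult_carries_baseb.1 ∧ count_mult_carries_baseb_alt (pvDiffWitness_count_mult_carries_baseb.1) (pvDiffWitness_count_mult_carries_baseb.2.1) (pvDiffWitness_count_mult_carries_baseb.2.2) = pvDiffWitnessOut_count_mult_carries_baseb.2 ∧ pvDiffWitnessOut_count_mult_carries_baseb.1 ≠ pvDiffWitnessOut_count_mult_carries_baseb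.2
def Claim_exact_count_mult_carries_baseb : Prop := ∀ (a : Int) (b : Int) (base : Int), Dom_count_mult_carries_baseb a b base → Pre_count_mult_carries_baseb a b base → D_count_mult_carries_baseb a b base → count_mult_carries_baseb a b base ≠ count_mult_carries_baseb_alt a b base

-- ===== LEMMAS AND PROOFS =====

-- one-step unfolding equations for the fuelled loops
theorem pvInnerA_succ (base db : Int) (f : Nat) (aa carry acc : Int) :
    pvInnerA base db (f + 1) aa carry acc
      = if aa > 0 ∨ carry > 0 then
          (if PySem.Int.mod aa base * db + carry ≥ base then
            pvInnerA base db f (PySem.Int.floordiv aa base)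
              (PySem.Int.floordiv (PySem.Int.mod aa base * db + carry) base) (acc + 1)
          else pvInnerA base db f (PySem.Int.floordiv aa base) 0 acc)
        else acc := rfl

theorem pvOuterA_succ (a base : Int) (f : Nat) (bb acc : Int) :
    pvOuterA a base (f + 1) bb acc
      = if bb > 0 then
          pvOuterA a base f (PySem.Int.floordiv bb base)
            (pvInnerA base (PySem.Int.mod bb base) (a.natAbs + 2) a 0 acc)
        else acc := rfl

theorem pvInnerB_succ (a db base : Int) (f : Nat) (p acc : Int) :
    pvInnerB a db base (f + 1) p acc
      = if p ≤ a * db then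
          pvInnerB a db base f (p * base)
            (if (PySem.Int.mod a p) * db ≥ p then acc + 1 else acc)
        else acc := rfl

theorem pvOuterB_succ (a base : Int) (f : Nat) (bb acc : Int) :
    pvOuterB a base (f + 1) bb acc
      = if bb > 0 then
          pvOuterB a base f (PySem.Int.floordiv bb base)
            (pvInnerB a (PySem.Int.mod bb base) base (a.natAbs + 2) base acc)
        else acc := rfl

-- the accumulators only grow (used for the tight theorem)
theorem pvInnerA_ge (base db : Int) : ∀ (fuel : Nat) (aa carry acc : Int),
    acc ≤ pvInnerA base db fuel aa carry acc := by
  intro fuel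
  induction fuel with
  | zero => intro aa carry acc; simp [pvInnerA]
  | succ f ih =>
    intro aa carry acc
    rw [pvInnerA_succ]
    split_ifs with h1 h2
    · exact le_trans (by omega) (ih _ _ (acc + 1))
    · exact ih _ _ acc
    · exact le_refl _

theorem pvOuterA_ge (a base : Int) : ∀ (fuel : Nat) (bb acc : Int),
    acc ≤ pvOuterA a base fuel bb acc := by
  intro fuel
  induction fuel with
  | zero => intro bb acc; simp [pvOuterA]
  | succ f ih =>
    intro bb acc
    rw [pvOuterA_succ]
    split_ifs with h1
    · exact le_trans (pvInnerA_ge _ _ _ _ _ _) (ih _ _)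
    · exact le_refl _

-- A's inner loop written as a pure recursion (guard dropped; extra steps add 0)
def pvCnt (db base : Int) : Nat → Int → Int → Int
  | 0, _, _ => 0
  | f + 1, aa, c =>
    (if aa % base * db + c ≥ base then 1 else 0)
      + pvCnt db base f (aa / base) ((aa % base * db + c) / base)

-- B's sum over powers p, p*base, …, with an extra carry summand c
def pvSumC (a db c base : Int) : Nat → Int → Int
  | 0, _ => 0
  | f + 1, p =>
    (if a % p * db + c ≥ p then 1 else 0) + pvSumC a db c base f (p * base)

theorem pvCnt_zero (db base : Int) (hb : 2 ≤ base) : ∀ f, pvCnt db base f 0 0 = 0 := by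
  intro f
  induction f with
  | zero => rfl
  | succ g ih =>
    show (if (0:Int) % base * db + 0 ≥ base then 1 else 0)
        + pvCnt db base g ((0:Int) / base) (((0:Int) % base * db + 0) / base) = 0
    simp only [Int.zero_emod, zero_mul, zero_add, Int.zero_ediv]
    rw [if_neg (by omega), ih]
    omega

-- A's inner loop equals acc + pvCnt, at every fuel, for nonnegative state
theorem pvInnerA_eq_cnt (db base : Int) (hb : 2 ≤ base) (hdb : 0 ≤ db) :
    ∀ (f : Nat) (aa c acc : Int), 0 ≤ aa → 0 ≤ c →
      pvInnerA base db f aa c acc = acc + pvCnt db base f aa c := by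
  intro f
  induction f with
  | zero => intro aa c acc _ _; simp [pvInnerA, pvCnt]
  | succ g ih =>
    intro aa c acc ha hc
    have hbpos : (0:Int) < base := by omega
    rw [pvInnerA_succ, PySem.Int.mod_eq_emod_of_pos hbpos,
        PySem.Int.floordiv_eq_ediv_of_pos hbpos, PySem.Int.floordiv_eq_ediv_of_pos hbpos]
    have hda0 : 0 ≤ aa % base := Int.emod_nonneg aa (by omega)
    have hprod0 : 0 ≤ aa % base * db + c := by positivity
    have hq0 : 0 ≤ aa / base := Int.ediv_nonneg ha (by omega)
    have hc'0 : 0 ≤ (aa % base * db + c) / base := Int.ediv_nonneg hprod0 (by omega)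
    have hexp : pvCnt db base (g + 1) aa c
        = (if aa % base * db + c ≥ base then 1 else 0)
          + pvCnt db base g (aa / base) ((aa % base * db + c) / base) := rfl
    rw [hexp]
    by_cases hguard : aa > 0 ∨ c > 0
    · rw [if_pos hguard]
      by_cases hge : aa % base * db + c ≥ base
      · rw [if_pos hge, if_pos hge, ih _ _ _ hq0 hc'0]; omega
      · have hz : (aa % base * db + c) / base = 0 :=
          Int.ediv_eq_zero_of_lt hprod0 (by omega)
        rw [if_neg hge, if_neg hge, ih _ _ _ hq0 (le_refl 0), hz]
        omega
    · rw [if_neg hguard]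
      have haz : aa = 0 := by omega
      have hcz : c = 0 := by omega
      subst haz; subst hcz
      simp only [Int.zero_emod, zero_mul, zero_add, Int.zero_ediv]
      rw [if_neg (by omega), pvCnt_zero db base hb]
      omega

-- the sum over powers is empty once p exceeds a*db
theorem pvSumC_zero (a db base : Int) (hb : 2 ≤ base) (ha : 0 ≤ a) (hdb : 0 ≤ db) :
    ∀ (f : Nat) (p : Int), 0 < p → a * db < p → pvSumC a db 0 base f p = 0 := by
  intro f
  induction f with
  | zero => intro p _ _; rfl
  | succ g ih =>
    intro p hp hlt
    have hmod : a % p ≤ a := by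
      have h1 : 0 ≤ a / p := Int.ediv_nonneg ha (le_of_lt hp)
      have h2 := Int.emod_add_mul_ediv a p
      nlinarith
    have hterm : a % p * db + 0 < p := by
      have : a % p * db ≤ a * db := by
        exact mul_le_mul_of_nonneg_right hmod hdb
      omega
    show (if a % p * db + 0 ≥ p then 1 else 0) + pvSumC a db 0 base g (p * base) = 0
    rw [if_neg (by omega), ih (p * base) (by positivity) (by nlinarith)]
    omega

-- B's inner loop equals acc + the sum over powers, at every fuel
theorem pvInnerB_eq_sum (a db base : Int) (hb : 2 ≤ base) (ha : 0 ≤ a) (hdb : 0 ≤ db) :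
    ∀ (f : Nat) (p acc : Int), 0 < p →
      pvInnerB a db base f p acc = acc + pvSumC a db 0 base f p := by
  intro f
  induction f with
  | zero => intro p acc _; simp [pvInnerB, pvSumC]
  | succ g ih =>
    intro p acc hp
    rw [pvInnerB_succ, PySem.Int.mod_eq_emod_of_pos hp]
    by_cases hle : p ≤ a * db
    · rw [if_pos hle]
      have hexp : pvSumC a db 0 base (g + 1) p
          = (if a % p * db + 0 ≥ p then 1 else 0) + pvSumC a db 0 base g (p * base) := rfl
      rw [hexp, ih (p * base) _ (by positivity)]
      by_cases hge : a % p * db ≥ p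
      · rw [if_pos hge, if_pos (by omega)]; omega
      · rw [if_neg hge, if_neg (by omega)]; omega
    · rw [if_neg hle, pvSumC_zero a db base hb ha hdb (g + 1) p hp (by omega)]
      omega

-- digit/carry shift: one step of the carry recursion shifts the power sum by base
theorem pvSumC_shift (aa db c base : Int) (hb : 2 ≤ base) :
    ∀ (f : Nat) (p : Int), 0 < p →
      pvSumC (aa / base) db ((aa % base * db + c) / base) base f p
        = pvSumC aa db c base f (p * base) := by
  intro f
  induction f with
  | zero => intro p _; rfl
  | succ g ih =>
    intro p hp
    have hbpos : (0:Int) < base := by omega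
    show (if (aa / base) % p * db + (aa % base * db + c) / base ≥ p then 1 else 0)
          + pvSumC (aa / base) db ((aa % base * db + c) / base) base g (p * base)
        = (if aa % (p * base) * db + c ≥ p * base then 1 else 0)
          + pvSumC aa db c base g (p * base * base)
    have hmod : aa % (p * base) = aa % base + base * ((aa / base) % p) := by
      have h1 := Int.emod_add_mul_ediv aa base
      have h2 := Int.emod_add_mul_ediv (aa / base) p
      have h3 : aa / (base * p) = aa / base / p := (Int.ediv_ediv_of_nonneg (by omega : (0:Int) ≤ base)).symm
      have h4 : aa % (p * base) = aa - (p * base) * (aa / (p * base)) := Int.emod_def aa (p * base)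
      have h5 : aa % base = aa - base * (aa / base) := Int.emod_def aa base
      have h6 : (aa / base) % p = aa / base - p * (aa / base / p) := Int.emod_def (aa / base) p
      have h7 : aa / (p * base) = aa / base / p := by rw [mul_comm]; exact h3
      rw [h4, h5, h6, h7]; ring
    have hiff : (aa % (p * base) * db + c ≥ p * base)
        ↔ ((aa / base) % p * db + (aa % base * db + c) / base ≥ p) := by
      rw [hmod]
      constructor
      · intro h
        have hK : (p - (aa / base) % p * db) * base ≤ aa % base * db + c := by nlinarith
        have := (Int.le_ediv_iff_mul_le hbpos).mpr hK
        omega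
      · intro h
        have := (Int.le_ediv_iff_mul_le hbpos).mp (by omega :
          p - (aa / base) % p * db ≤ (aa % base * db + c) / base)
        nlinarith
    rw [ih (p * base) (by positivity)]
    congr 1
    by_cases hx : aa % (p * base) * db + c ≥ p * base
    · rw [if_pos hx, if_pos (hiff.mp hx)]
    · rw [if_neg hx, if_neg (fun hy => hx (hiff.mpr hy))]

-- the carry recursion equals the power sum (same fuel)
theorem pvCnt_eq_sum (db base : Int) (hb : 2 ≤ base) :
    ∀ (f : Nat) (aa c : Int), pvCnt db base f aa c = pvSumC aa db c base f base := by
  intro f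
  induction f with
  | zero => intro aa c; rfl
  | succ g ih =>
    intro aa c
    show (if aa % base * db + c ≥ base then 1 else 0)
          + pvCnt db base g (aa / base) ((aa % base * db + c) / base)
        = (if aa % base * db + c ≥ base then 1 else 0) + pvSumC aa db c base g (base * base)
    rw [ih, pvSumC_shift aa db c base hb g base (by omega)]

-- A's inner loop and B's inner loop agree for every a (same fuel)
theorem pvInner_eq (a db base : Int) (hb : 2 ≤ base) (hdb : 0 ≤ db) (f : Nat) (acc : Int) :
    pvInnerA base db f a 0 acc = pvInnerB a db base f base acc := by
  by_cases ha : 0 ≤ a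
  · rw [pvInnerA_eq_cnt db base hb hdb f a 0 acc ha (le_refl 0),
      pvInnerB_eq_sum a db base hb ha hdb f base acc (by omega),
      pvCnt_eq_sum db base hb]
  · cases f with
    | zero => rfl
    | succ g =>
      rw [pvInnerA_succ, if_neg (by omega), pvInnerB_succ,
        if_neg (by nlinarith : ¬ base ≤ a * db)]

-- the outer loops agree for base ≥ 2 (same fuel, any bb)
theorem pvOuter_eq (a base : Int) (hb : 2 ≤ base) :
    ∀ (f : Nat) (bb acc : Int), pvOuterA a base f bb acc = pvOuterB a base f bb acc := by
  intro f
  induction f with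
  | zero => intro bb acc; rfl
  | succ g ih =>
    intro bb acc
    rw [pvOuterA_succ, pvOuterB_succ]
    split_ifs with hbb
    · rw [pvInner_eq a (PySem.Int.mod bb base) base hb
        (PySem.Int.mod_nonneg bb (by omega)) (a.natAbs + 2) acc, ih]
    · rfl

-- ===== VERDICT (by name: the statement is the Claim_ definition above) =====
theorem count_mult_carries_baseb_spec : Claim_unchanged_count_mult_carries_baseb := by
  intro a b base _ hpre
  unfold Spec_count_mult_carries_baseb
  intro hnd
  by_cases hb2 : 2 ≤ base
  · unfold count_mult_carries_baseb count_mult_carries_baseb_alt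
    rw [if_neg (by omega), pvOuter_eq a base hb2]
  · have hAlt : count_mult_carries_baseb_alt a b base = 0 := by
      unfold count_mult_carries_baseb_alt
      rw [if_pos (by omega)]
    rw [hAlt]
    unfold count_mult_carries_baseb
    by_cases hbl : b ≤ 0
    · rw [pvOuterA_succ, if_neg (by omega)]
    · have hbase : base < 0 := by
        unfold Pre_count_mult_carries_baseb at hpre; omega
      have ha : a ≤ 0 := by
        by_contra hac
        exact hnd ⟨hbase, by omega, by omega⟩
      rw [pvOuterA_succ, if_pos (by omega)]
      have hinner : pvInnerA base (PySem.Int.mod b base) (a.natAbs + 2) a 0 0 = 0 := by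
        obtain ⟨g, hg⟩ : ∃ g, a.natAbs + 2 = g + 1 := ⟨a.natAbs + 1, rfl⟩
        rw [hg, pvInnerA_succ, if_neg (by omega : ¬ (a > 0 ∨ (0:Int) > 0))]
      rw [hinner]
      have hmodb := PySem.Int.mod_neg_bounds b hbase
      have hfdneg : PySem.Int.floordiv b base < 0 := by
        have h := PySem.Int.floordiv_mul_add_mod b base
        nlinarith [hmodb.1, hmodb.2]
      obtain ⟨g, hg⟩ : ∃ g, b.natAbs = g + 1 := ⟨b.natAbs - 1, by omega⟩
      rw [hg, pvOuterA_succ, if_neg (by omega)]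

theorem count_mult_carries_baseb_changed : Claim_changed_count_mult_carries_baseb := by
  unfold Claim_changed_count_mult_carries_baseb; decide

theorem count_mult_carries_baseb_tight : Claim_exact_count_mult_carries_baseb := by
  intro a b base _ _ hd
  obtain ⟨hbase, ha, hb⟩ := hd
  have hB : count_mult_carries_baseb_alt a b base = 0 := by
    unfold count_mult_carries_baseb_alt; rw [if_pos (by omega)]
  rw [hB]
  unfold count_mult_carries_baseb
  rw [pvOuterA_succ, if_pos (by omega)]
  have h1 : (1:Int) ≤ pvInnerA base (PySem.Int.mod b base) (a.natAbs + 2) a 0 0 := by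
    obtain ⟨g, hg⟩ : ∃ g, a.natAbs + 2 = g + 1 + 1 := ⟨a.natAbs, rfl⟩
    rw [hg, pvInnerA_succ, if_pos (Or.inl (by omega))]
    have hma := PySem.Int.mod_neg_bounds a hbase
    have hmb := PySem.Int.mod_neg_bounds b hbase
    have hprod : PySem.Int.mod a base * PySem.Int.mod b base + 0 ≥ base := by
      nlinarith [hma.2, hmb.2]
    rw [if_pos hprod]
    exact le_trans (by omega) (pvInnerA_ge base (PySem.Int.mod b base) (g + 1)
      (PySem.Int.floordiv a base)
      (PySem.Int.floordiv (PySem.Int.mod a base * PySem.Int.mod b base + 0) base) (0 + 1))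
  have h2 := pvOuterA_ge a base b.natAbs (PySem.Int.floordiv b base)
    (pvInnerA base (PySem.Int.mod b base) (a.natAbs + 2) a 0 0)
  omega
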